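-- pv_equiv track=rewrite | github.com/muskan64star/gfg-repo | Medium/Find the N-th character/find-the-nth-character.py | nthCharacter
-- ===== SOURCE A (Python) =====
-- def nthCharacter(s, r, n):
--     # code here
--     ans = ""
--     while r>0:
--         for i in range(min(len(s),n+2)):
--             if s[i]=="0":
--                 ans += "01"
--             else:
--                 ans += "10"
--         s = ans
--         ans = ""
--         r -= 1
--     return s[n]
-- ===== SOURCE B (Python) =====
-- def nthCharacter(s, r, n):
--     # O(log n): map index n back through the r doubling rounds instead of building the string.
--     # round image of a char c is (c, flip c) with c mapped to bit 0/1 ('0' -> 0, anything else -> 1),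
--     # so the bit at index n after r rounds is bit(s[n >> r]) XOR popcount(low r bits of n).
--     if r <= 0:
--         return s[n]
--     k = min(r, n.bit_length())          # rounds beyond the bit length of n shift nothing more
--     base = n >> k
--     m = n & ((1 << k) - 1)
--     ones = 0
--     while m:
--         ones += m & 1
--         m >>= 1
--     bit0 = 0 if s[base] == "0" else 1
--     return "0" if (bit0 + ones) % 2 == 0 else "1"
-- ===== Notes on version B (the rewrite author's own statement) =====
-- stated objective: faster
-- what changed: Instead of materialising r doubled strings and indexing, B maps index n back through the morphism: the answer is bit(s[n >> r]) XOR the popcount of the low r bits of n, computed in O(log n) with no string built.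
-- outside the precondition, e.g. on nthCharacter('01', 2, -1): A returns '1', B returns '0'
import Mathlib
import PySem

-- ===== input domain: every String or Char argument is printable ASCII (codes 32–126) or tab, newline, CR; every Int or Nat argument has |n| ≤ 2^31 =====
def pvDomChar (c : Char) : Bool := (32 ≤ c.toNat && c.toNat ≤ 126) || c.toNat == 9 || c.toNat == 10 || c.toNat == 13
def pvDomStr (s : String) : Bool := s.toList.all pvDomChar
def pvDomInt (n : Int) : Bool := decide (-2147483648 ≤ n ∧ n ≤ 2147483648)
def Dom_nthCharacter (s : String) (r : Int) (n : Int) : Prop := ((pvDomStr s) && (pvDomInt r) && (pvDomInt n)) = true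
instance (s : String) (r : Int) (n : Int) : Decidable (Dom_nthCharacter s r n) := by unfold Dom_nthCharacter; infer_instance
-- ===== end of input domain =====

-- B replaces A's r rounds of string doubling by pulling index n back through the
-- morphism (bit(s[n >> r]) XOR popcount of the low r bits of n); measurably faster (asymptotic).

-- ===== PORT A =====
-- one round of A's for-loop: ans += "01"/"10" for each i in range(min(len(s), n+2))
-- (the range guarantees 0 ≤ i < len s, so pyGetD is exact for s[i])
def pvExpandA (s : List Char) (n : Int) : List Char :=
  (PySem.List.pyRange 0 (min (PySem.List.len s) (n + 2)) 1).foldl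
    (fun ans i => ans ++ (if PySem.List.pyGetD s i ' ' = '0' then ['0', '1'] else ['1', '0'])) []

-- A's while loop: r is decremented by 1 each round, so it runs exactly r.toNat times
def pvLoopA (s : List Char) (n : Int) : Nat → List Char
  | 0 => s
  | k + 1 => pvLoopA (pvExpandA s n) n k

def nthCharacter (s : String) (r : Int) (n : Int) : String :=
  match PySem.List.pyGet? (pvLoopA s.toList n r.toNat) n with
  | some c => String.ofList [c]
  | none => ""        -- s[n] IndexError: excluded by Pre_

-- ===== PORT B =====
-- B's popcount while-loop: while m: ones += m & 1; m >>= 1   (exact for m ≥ 0, guaranteed under Pre_)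
def pvOnes : Nat → Nat
  | 0 => 0
  | m + 1 => (m + 1) % 2 + pvOnes ((m + 1) / 2)

def nthCharacter_alt (s : String) (r : Int) (n : Int) : String :=
  if r ≤ 0 then
    match PySem.List.pyGet? s.toList n with
    | some c => String.ofList [c]
    | none => ""      -- s[n] IndexError: excluded by Pre_
  else
    -- k = min(r, n.bit_length()); 0 < r so the min is nonnegative and toNat is exact
    let k : Nat := (min r ((PySem.Int.bitLength n : Nat) : Int)).toNat
    let base : Int := n >>> k
    let m : Int := PySem.Int.band n (((1 : Int) <<< k) - 1)
    match PySem.List.pyGet? s.toList base with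
    | none => ""      -- s[base] IndexError: excluded by Pre_
    | some c =>
      let ones : Nat := pvOnes m.toNat
      let bit0 : Nat := if c = '0' then 0 else 1
      if (bit0 + ones) % 2 = 0 then "0" else "1"

-- ===== PRECONDITION & SPEC =====
-- Pre_ = exactly where A returns without IndexError, except that for r > 0 it also excludes
-- negative n (only n = -1 returns there): combining Python's negative indexing with the
-- per-round truncation to n+2 characters, either value is defensible on that unspecified
-- corner, and B's backward-mapped value differs from A's.
def Pre_nthCharacter (s : String) (r : Int) (n : Int) : Prop :=
  (r ≤ 0 ∧ PySem.Raise.InRange s.toList.length n) ∨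
  (0 < r ∧ 0 ≤ n ∧ n < (s.toList.length : Int) * 2 ^ r.toNat)
instance (s : String) (r : Int) (n : Int) : Decidable (Pre_nthCharacter s r n) := by
  unfold Pre_nthCharacter; infer_instance

def pvWitness_nthCharacter : String × Int × Int := ("01a", 3, 5)

def Spec_nthCharacter (s : String) (r : Int) (n : Int) (out : String) : Prop := out = nthCharacter_alt s r n
instance (s : String) (r : Int) (n : Int) (out : String) : Decidable (Spec_nthCharacter s r n out) := by unfold Spec_nthCharacter; infer_instance

-- ===== CLAIM (what is proved, stated in full; the proofs are below) =====
def Claim_equal_nthCharacter : Prop := ∀ (s : String) (r : Int) (n : Int), Dom_nthCharacter s r n → Pre_nthCharacter s r n → Spec_nthCharacter s r n (nthCharacter s r n)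

-- ===== LEMMAS AND PROOFS =====

def pvBit (c : Char) : Nat := if c = '0' then 0 else 1
def pvBitChar (b : Nat) : Char := if b = 0 then '0' else '1'
def pvExp (c : Char) : List Char := if c = '0' then ['0', '1'] else ['1', '0']

theorem pvOnes_eq (m : Nat) : pvOnes m = m % 2 + pvOnes (m / 2) := by
  cases m with
  | zero => simp [pvOnes]
  | succ k => rw [pvOnes]

theorem pvOnes_add_pow (t : Nat) : ∀ a b : Nat, a < 2 ^ t →
    pvOnes (a + 2 ^ t * b) = pvOnes a + pvOnes b := by
  induction t with
  | zero =>
    intro a b ha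
    interval_cases a
    simp [pvOnes]
  | succ t ih =>
    intro a b ha
    have h2 : (0:Nat) < 2 ^ t := Nat.two_pow_pos t
    have hmod : (a + 2 ^ (t + 1) * b) % 2 = a % 2 := by
      have : 2 ^ (t + 1) * b = 2 * (2 ^ t * b) := by ring
      omega
    have hdiv : (a + 2 ^ (t + 1) * b) / 2 = a / 2 + 2 ^ t * b := by
      have : 2 ^ (t + 1) * b = 2 * (2 ^ t * b) := by ring
      omega
    rw [pvOnes_eq (a + 2 ^ (t + 1) * b), hmod, hdiv, ih (a / 2) b (by omega),
      pvOnes_eq a]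
    omega

theorem expandA_eq (s : List Char) (n : Int) :
    pvExpandA s n =
      ((List.range (min (s.length : Int) (n + 2)).toNat).map
        (fun k => pvExp (s.getD k ' '))).flatten := by
  unfold pvExpandA
  rw [PySem.List.foldl_append_eq_flatMap]
  simp [PySem.List.pyRange_one, List.flatMap_def, pvExp, Function.comp_def,
    List.getD_eq_getElem?_getD]

theorem expandA_length (s : List Char) (n : Int) :
    (pvExpandA s n).length = 2 * (min (s.length : Int) (n + 2)).toNat := by
  rw [expandA_eq, List.length_flatten, List.map_map]
  have h2 : ∀ c, (pvExp c).length = 2 := by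
    intro c; unfold pvExp; split <;> rfl
  simp [Function.comp_def, h2, Nat.mul_comm]

theorem flatten2_getElem? (L : List (List Char)) (h : ∀ b ∈ L, b.length = 2) (j : Nat) :
    L.flatten[j]? = L[j / 2]?.bind (fun b => b[j % 2]?) := by
  induction L generalizing j with
  | nil => simp
  | cons b L ih =>
    have hb : b.length = 2 := h b List.mem_cons_self
    by_cases hj : j < 2
    · rw [List.flatten_cons, List.getElem?_append_left (by omega)]
      have h0 : j / 2 = 0 := by omega
      have h1 : j % 2 = j := by omega
      simp [h0, h1]
    · rw [List.flatten_cons, List.getElem?_append_right (by omega)]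
      rw [hb, ih (fun x hx => h x (List.mem_cons_of_mem _ hx)) (j - 2)]
      have h0 : j / 2 = (j - 2) / 2 + 1 := by omega
      have h1 : (j - 2) % 2 = j % 2 := by omega
      simp [h0, h1]

theorem expandA_get (s : List Char) (n : Int) (j : Nat) (hj : j < (pvExpandA s n).length) :
    (pvExpandA s n)[j]? = some (pvBitChar ((pvBit (s.getD (j / 2) ' ') + j % 2) % 2)) := by
  have hlen := expandA_length s n
  rw [expandA_eq]
  rw [flatten2_getElem? _ (by intro b hb; simp at hb; obtain ⟨k, -, rfl⟩ := hb
                              unfold pvExp; split <;> rfl)]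
  have hk : j / 2 < (min (s.length : Int) (n + 2)).toNat := by omega
  rw [List.getElem?_map, List.getElem?_range hk]
  have hc : ∀ c : Char, (pvExp c)[j % 2]? = some (pvBitChar ((pvBit c + j % 2) % 2)) := by
    intro c
    unfold pvExp pvBit pvBitChar
    rcases Nat.mod_two_eq_zero_or_one j with h2 | h2 <;> rw [h2] <;>
      by_cases hc : c = '0' <;> simp [hc]
  simp [hc]

theorem loopA_len_le (n : Int) : ∀ (k : Nat) (s : List Char),
    (pvLoopA s n k).length ≤ s.length * 2 ^ k := by
  intro k
  induction k with
  | zero => intro s; simp [pvLoopA]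
  | succ k ih =>
    intro s
    have hM : (min (s.length : Int) (n + 2)).toNat ≤ s.length := by omega
    calc (pvLoopA s n (k + 1)).length = (pvLoopA (pvExpandA s n) n k).length := by rw [pvLoopA]
      _ ≤ (pvExpandA s n).length * 2 ^ k := ih _
      _ = 2 * (min (s.length : Int) (n + 2)).toNat * 2 ^ k := by rw [expandA_length]
      _ ≤ 2 * s.length * 2 ^ k := Nat.mul_le_mul_right _ (by omega)
      _ = s.length * 2 ^ (k + 1) := by ring

theorem loopA_len_ge (n : Int) (hn : 0 ≤ n) : ∀ (k : Nat) (s : List Char), 1 ≤ s.length →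
    min (s.length * 2 ^ k) (n.toNat + 1) ≤ (pvLoopA s n k).length := by
  intro k
  induction k with
  | zero => intro s hs; simp [pvLoopA]
  | succ k ih =>
    intro s hs
    set M : Nat := (min (s.length : Int) (n + 2)).toNat with hMdef
    have hM : M = min s.length (n.toNat + 2) := by omega
    have hM1 : 1 ≤ M := by omega
    have hlen' : (pvExpandA s n).length = 2 * M := expandA_length s n
    have h1 : 1 ≤ (pvExpandA s n).length := by omega
    have hih := ih (pvExpandA s n) h1
    rw [hlen'] at hih
    rw [show pvLoopA s n (k + 1) = pvLoopA (pvExpandA s n) n k from by rw [pvLoopA]]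
    refine le_trans ?_ hih
    have h2k : (1:Nat) ≤ 2 ^ k := Nat.one_le_two_pow
    rcases Nat.le_total s.length (n.toNat + 2) with hc | hc
    · have hMe : M = s.length := by omega
      rw [hMe]
      have : s.length * 2 ^ (k + 1) = 2 * s.length * 2 ^ k := by ring
      omega
    · have hMe : M = n.toNat + 2 := by omega
      have : n.toNat + 1 ≤ 2 * M * 2 ^ k := by
        calc n.toNat + 1 ≤ 2 * M * 1 := by omega
          _ ≤ 2 * M * 2 ^ k := Nat.mul_le_mul_left _ h2k
      omega

theorem pvBit_pvBitChar (b : Nat) (h : b < 2) : pvBit (pvBitChar b) = b := by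
  interval_cases b <;> decide

theorem loopA_get (n : Int) : ∀ (k : Nat) (s : List Char) (j : Nat), (j : Int) ≤ n →
    j < (pvLoopA s n (k + 1)).length →
    (pvLoopA s n (k + 1))[j]? =
      some (pvBitChar ((pvBit (s.getD (j / 2 ^ (k + 1)) ' ') + pvOnes (j % 2 ^ (k + 1))) % 2)) := by
  intro k
  induction k with
  | zero =>
    intro s j hj hlt
    rw [show pvLoopA s n 1 = pvExpandA s n from by rw [pvLoopA, pvLoopA]] at hlt ⊢
    rw [expandA_get s n j hlt]
    have h1 : j / 2 ^ 1 = j / 2 := by norm_num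
    have h2 : j % 2 ^ 1 = j % 2 := by norm_num
    rw [h1, h2]
    rcases Nat.mod_two_eq_zero_or_one j with h | h <;> rw [h] <;> simp [pvOnes]
  | succ k ih =>
    intro s j hj hlt
    rw [show pvLoopA s n (k + 2) = pvLoopA (pvExpandA s n) n (k + 1) from by rw [pvLoopA]] at hlt ⊢
    rw [ih (pvExpandA s n) j hj hlt]
    have h2p : (0:Nat) < 2 ^ (k + 1) := Nat.two_pow_pos _
    have hj' : j / 2 ^ (k + 1) < (pvExpandA s n).length := by
      have hle := loopA_len_le n (k + 1) (pvExpandA s n)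
      have h2 : j < 2 ^ (k + 1) * (pvExpandA s n).length := by
        calc j < (pvLoopA (pvExpandA s n) n (k + 1)).length := hlt
          _ ≤ (pvExpandA s n).length * 2 ^ (k + 1) := hle
          _ = 2 ^ (k + 1) * (pvExpandA s n).length := Nat.mul_comm _ _
      exact Nat.div_lt_of_lt_mul h2
    have hget := expandA_get s n (j / 2 ^ (k + 1)) hj'
    have hgd : (pvExpandA s n).getD (j / 2 ^ (k + 1)) ' ' =
        pvBitChar ((pvBit (s.getD (j / 2 ^ (k + 1) / 2) ' ') + j / 2 ^ (k + 1) % 2) % 2) := by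
      rw [List.getD_eq_getElem?_getD, hget]; rfl
    rw [hgd, pvBit_pvBitChar _ (Nat.mod_lt _ (by norm_num))]
    have hdd : j / 2 ^ (k + 1) / 2 = j / 2 ^ (k + 1 + 1) := by
      rw [Nat.div_div_eq_div_mul, ← pow_succ]
    have hmm : j % 2 ^ (k + 1 + 1) = j % 2 ^ (k + 1) + 2 ^ (k + 1) * (j / 2 ^ (k + 1) % 2) := by
      rw [pow_succ]
      exact Nat.mod_mul
    rw [hdd, hmm, pvOnes_add_pow (k + 1) _ _ (Nat.mod_lt _ h2p)]
    have hones : pvOnes (j / 2 ^ (k + 1) % 2) = j / 2 ^ (k + 1) % 2 := by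
      rcases Nat.mod_two_eq_zero_or_one (j / 2 ^ (k + 1)) with h | h <;> rw [h] <;> simp [pvOnes]
    rw [hones]
    congr 2
    omega

theorem nthCharacter_spec_pos (s : String) (r : Int) (n : Int)
    (hr : 0 < r) (hn : 0 ≤ n)
    (hlt : n < (s.toList.length : Int) * 2 ^ r.toNat) :
    nthCharacter s r n = nthCharacter_alt s r n := by
  have hNint : ((n.toNat : Int)) = n := Int.toNat_of_nonneg hn
  -- the index is below the untruncated final length
  have hbound : n.toNat < s.toList.length * 2 ^ r.toNat := by
    have h2 : ((s.toList.length * 2 ^ r.toNat : Nat) : Int) =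
        (s.toList.length : Int) * 2 ^ r.toNat := by push_cast; ring
    omega
  have hL1 : 1 ≤ s.toList.length := by
    by_contra h
    have h0 : s.toList.length = 0 := by omega
    rw [h0, Nat.zero_mul] at hbound
    omega
  have hglen := loopA_len_ge n hn r.toNat s.toList hL1
  have hNlen : n.toNat < (pvLoopA s.toList n r.toNat).length := by omega
  have hidx : n.toNat / 2 ^ r.toNat < s.toList.length :=
    Nat.div_lt_of_lt_mul (lt_of_lt_of_le hbound (le_of_eq (Nat.mul_comm _ _)))
  -- A's value at index n via the morphism characterisation
  obtain ⟨R', hR'⟩ : ∃ m, r.toNat = m + 1 := ⟨r.toNat - 1, by omega⟩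
  have hA : (pvLoopA s.toList n r.toNat)[n.toNat]? =
      some (pvBitChar ((pvBit (s.toList.getD (n.toNat / 2 ^ r.toNat) ' ') +
        pvOnes (n.toNat % 2 ^ r.toNat)) % 2)) := by
    rw [hR']
    exact loopA_get n R' s.toList n.toNat (by omega) (by rw [← hR']; exact hNlen)
  have hAeq : nthCharacter s r n =
      String.ofList [pvBitChar ((pvBit (s.toList.getD (n.toNat / 2 ^ r.toNat) ' ') +
        pvOnes (n.toNat % 2 ^ r.toNat)) % 2)] := by
    unfold nthCharacter
    rw [PySem.List.pyGet?_of_nonneg (pvLoopA s.toList n r.toNat) hn, hA]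
  -- B's value: reduce the shift/mask of the capped k to plain div/mod by 2^r
  have hBn : n.toNat < 2 ^ PySem.Int.bitLength n := by
    have h1 := PySem.Int.lt_two_pow_bitLength n
    have h2 : n.natAbs = n.toNat := by omega
    omega
  have hkval : (min r ((PySem.Int.bitLength n : Nat) : Int)).toNat =
      min r.toNat (PySem.Int.bitLength n) := by omega
  have hdm : n.toNat / 2 ^ min r.toNat (PySem.Int.bitLength n) = n.toNat / 2 ^ r.toNat ∧
      n.toNat % 2 ^ min r.toNat (PySem.Int.bitLength n) = n.toNat % 2 ^ r.toNat := by
    rcases Nat.le_total (PySem.Int.bitLength n) r.toNat with hbr | hbr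
    · have hmin : min r.toNat (PySem.Int.bitLength n) = PySem.Int.bitLength n := by omega
      have hpow : (2:Nat) ^ PySem.Int.bitLength n ≤ 2 ^ r.toNat :=
        Nat.pow_le_pow_right (by norm_num) hbr
      rw [hmin, Nat.div_eq_of_lt hBn, Nat.div_eq_of_lt (by omega),
        Nat.mod_eq_of_lt hBn, Nat.mod_eq_of_lt (by omega)]
      exact ⟨rfl, rfl⟩
    · have hmin : min r.toNat (PySem.Int.bitLength n) = r.toNat := by omega
      rw [hmin]
      exact ⟨rfl, rfl⟩
  set K : Nat := min r.toNat (PySem.Int.bitLength n) with hKdef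
  have hshift : n >>> K = ((n.toNat / 2 ^ r.toNat : Nat) : Int) := by
    rw [← hdm.1]
    conv_lhs => rw [← hNint]
    have h1 : ∀ N : Nat, ((N : Int)) >>> K = ((N >>> K : Nat) : Int) := fun N => by simp
    rw [h1 n.toNat, Nat.shiftRight_eq_div_pow]
  have hmask0 : ((1:Int) <<< K) - 1 = ((2 ^ K - 1 : Nat) : Int) := by
    have hp : (1:Nat) ≤ 2 ^ K := Nat.one_le_two_pow
    push_cast [hp, Int.shiftLeft_eq]
    ring
  have hmask : PySem.Int.band n (((1:Int) <<< K) - 1) = ((n.toNat % 2 ^ r.toNat : Nat) : Int) := by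
    rw [← hdm.2]
    conv_lhs => rw [← hNint]
    rw [hmask0, PySem.Int.band_natCast, Nat.and_two_pow_sub_one_eq_mod]
  have hBeq : nthCharacter_alt s r n =
      (if (pvBit (s.toList.getD (n.toNat / 2 ^ r.toNat) ' ') +
        pvOnes (n.toNat % 2 ^ r.toNat)) % 2 = 0 then "0" else "1") := by
    unfold nthCharacter_alt
    rw [if_neg (by omega)]
    simp only [hkval, hshift, hmask, PySem.List.pyGet?_natCast, Int.toNat_natCast]
    rw [List.getElem?_eq_getElem hidx]
    simp only [pvBit, List.getD_eq_getElem?_getD, List.getElem?_eq_getElem hidx, Option.getD_some]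
  rw [hAeq, hBeq]
  rcases Nat.mod_two_eq_zero_or_one (pvBit (s.toList.getD (n.toNat / 2 ^ r.toNat) ' ') +
      pvOnes (n.toNat % 2 ^ r.toNat)) with h | h <;> rw [h] <;> simp [pvBitChar]

-- ===== VERDICT (by name: the statement is the Claim_ definition above) =====
theorem nthCharacter_spec : Claim_equal_nthCharacter := by
  intro s r n hdom hpre
  unfold Spec_nthCharacter
  rcases hpre with ⟨hr, hin⟩ | ⟨hr, hn, hlt⟩
  · have h0 : r.toNat = 0 := by omega
    unfold nthCharacter nthCharacter_alt
    rw [h0, if_pos hr]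
    rfl
  · exact nthCharacter_spec_pos s r n hr hn hlt
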